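-- pv_equiv track=rewrite | github.com/Gajef/RecoJer | src/GlyphAsciiGenerator.py | compute_column_positions
-- ===== SOURCE A (Python) =====
-- def compute_column_positions(blocks, column_width):
--     column_positions = []
--     for block_columns in blocks:
--         for n_columns in range(0, block_columns - 1):
--             column_positions = [column_width] + column_positions
--         column_positions = [column_width * 2] + column_positions
--
--     column_positions = column_positions[1:]
--     return column_positions
-- ===== SOURCE B (Python) =====
-- def compute_column_positions(blocks, column_width):
--     segments = [[column_width] * (b - 1) for b in reversed(blocks)]
--     if not segments:
--         return []
--     out = list(segments[0])
--     for seg in segments[1:]: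
--         out.append(column_width * 2)
--         out += seg
--     return out
-- ===== Notes on version B (the rewrite author's own statement) =====
-- stated objective: faster
-- what changed: Replaces the nested prepend loops plus trailing [1:] slice with building the per-block segments once (in reversed order) and flattening them with a single separator between consecutive segments, so no element is prepended and no slice is needed.
import Mathlib
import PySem

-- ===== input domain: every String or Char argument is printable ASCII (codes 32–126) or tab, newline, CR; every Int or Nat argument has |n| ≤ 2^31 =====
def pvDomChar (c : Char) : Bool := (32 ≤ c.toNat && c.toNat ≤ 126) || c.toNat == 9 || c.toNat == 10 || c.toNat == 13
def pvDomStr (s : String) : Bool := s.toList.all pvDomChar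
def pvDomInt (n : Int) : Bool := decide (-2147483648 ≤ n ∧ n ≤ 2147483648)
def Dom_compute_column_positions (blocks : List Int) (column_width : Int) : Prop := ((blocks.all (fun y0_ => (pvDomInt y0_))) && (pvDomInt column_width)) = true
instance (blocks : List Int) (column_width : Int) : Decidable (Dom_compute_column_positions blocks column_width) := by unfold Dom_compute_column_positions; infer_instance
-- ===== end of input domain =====

-- ===== PORT A =====
def compute_column_positions (blocks : List Int) (column_width : Int) : List Int :=
  let column_positions : List Int :=
    blocks.foldl (fun cp block_columns =>
      let cp := (PySem.List.pyRange 0 (block_columns - 1) 1).foldl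
        (fun cp _ => column_width :: cp) cp
      (column_width * 2) :: cp) []
  PySem.List.slice column_positions (some 1) none

-- ===== PORT B =====
-- B (faster: linear vs A's quadratic prepending): one segment per block (reversed order), flattened with a single 2*width separator
-- between consecutive segments; no prepending, no trailing slice.
def compute_column_positions_alt (blocks : List Int) (column_width : Int) : List Int :=
  let segments := blocks.reverse.map (fun b => List.replicate (b - 1).toNat column_width)
  match segments with
  | [] => []
  | s :: rest => rest.foldl (fun out seg => (out ++ [column_width * 2]) ++ seg) s

-- ===== PRECONDITION & SPEC =====
def Spec_compute_column_positions (blocks : List Int) (column_width : Int) (out : List Int) : Prop := out = compute_column_positions_alt blocks column_width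
instance (blocks : List Int) (column_width : Int) (out : List Int) : Decidable (Spec_compute_column_positions blocks column_width out) := by unfold Spec_compute_column_positions; infer_instance

-- ===== CLAIM (what is proved, stated in full; the proofs are below) =====
def Claim_equal_compute_column_positions : Prop := ∀ (blocks : List Int) (column_width : Int), Dom_compute_column_positions blocks column_width → Spec_compute_column_positions blocks column_width (compute_column_positions blocks column_width)

-- ===== LEMMAS AND PROOFS =====

-- ===== VERDICT (by name: the statement is the Claim_ definition above) =====

-- the inner range-loop prepends (m).toNat copies of w
theorem pv_inner (w : Int) (m : Int) (acc : List Int) :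
    (PySem.List.pyRange 0 m 1).foldl (fun cp _ => w :: cp) acc
      = List.replicate m.toNat w ++ acc := by
  have gen : ∀ (l : List Int) (acc : List Int),
      l.foldl (fun cp _ => w :: cp) acc = List.replicate l.length w ++ acc := by
    intro l
    induction l with
    | nil => intro acc; simp
    | cons x xs ih =>
      intro acc
      simp [List.foldl, ih, List.replicate_succ']
  rw [gen]
  simp [PySem.List.length_pyRange_one]

-- A's outer fold builds the reversed-block segments, each headed by the 2w separator
theorem pv_outer (w : Int) (blocks : List Int) (acc : List Int) :
    blocks.foldl (fun cp b =>
        (w * 2) :: ((PySem.List.pyRange 0 (b - 1) 1).foldl (fun cp _ => w :: cp) cp)) acc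
      = (blocks.reverse.map (fun b => (w * 2) :: List.replicate (b - 1).toNat w)).flatten ++ acc := by
  induction blocks generalizing acc with
  | nil => simp
  | cons b bs ih =>
    simp only [List.foldl, List.reverse_cons, List.map_append, List.flatten_append]
    rw [ih, pv_inner]
    simp

-- B's fold appends the separator-headed tails of the remaining segments
theorem pv_bfold (w : Int) (segs : List (List Int)) (init : List Int) :
    segs.foldl (fun out seg => (out ++ [w * 2]) ++ seg) init
      = init ++ (segs.map (fun s => (w * 2) :: s)).flatten := by
  induction segs generalizing init with
  | nil => simp
  | cons s rest ih =>
    simp only [List.foldl]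
    rw [ih]
    simp

theorem pv_eq (blocks : List Int) (w : Int) :
    compute_column_positions blocks w = compute_column_positions_alt blocks w := by
  unfold compute_column_positions compute_column_positions_alt
  simp only [pv_outer, List.append_nil, PySem.List.slice_from_one]
  cases h : blocks.reverse with
  | nil => simp [h]
  | cons b bs =>
    simp only [h, List.map_cons, List.flatten_cons, pv_bfold]
    simp [List.map_map, Function.comp_def]

theorem compute_column_positions_spec : Claim_equal_compute_column_positions := by
  intro blocks w _
  unfold Spec_compute_column_positions
  exact pv_eq blocks w
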